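-- pv_equiv track=rewrite | github.com/weiz0823/cryptoPy | common.py | os2ip
-- ===== SOURCE A (Python) =====
-- def os2ip(osp):
--     if osp[0] & 0x80:
--         i = -1
--     else:
--         i = 0
--     for o in osp:
--         i <<= 8
--         i |= o
--     return i
-- ===== SOURCE B (Python) =====
-- def os2ip(osp):
--     neg = osp[0] & 0x80
--     i = -(1 << (8 * len(osp))) if neg else 0
--     shift = 0
--     for o in reversed(osp):
--         i |= o << shift
--         shift += 8
--     return i
-- ===== Notes on version B (the rewrite author's own statement) =====
-- stated objective: alternative
-- what changed: B seeds the two's-complement sign mask -(1<<(8*len)) once up front and then ORs each octet into the result back-to-front at its own bit position (shift amounts grow, the accumulator is never shifted), instead of A's front-to-back fold that pre-seeds -1/0 and shifts the whole accumulator by 8 before ORing in each octet.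
import Mathlib
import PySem

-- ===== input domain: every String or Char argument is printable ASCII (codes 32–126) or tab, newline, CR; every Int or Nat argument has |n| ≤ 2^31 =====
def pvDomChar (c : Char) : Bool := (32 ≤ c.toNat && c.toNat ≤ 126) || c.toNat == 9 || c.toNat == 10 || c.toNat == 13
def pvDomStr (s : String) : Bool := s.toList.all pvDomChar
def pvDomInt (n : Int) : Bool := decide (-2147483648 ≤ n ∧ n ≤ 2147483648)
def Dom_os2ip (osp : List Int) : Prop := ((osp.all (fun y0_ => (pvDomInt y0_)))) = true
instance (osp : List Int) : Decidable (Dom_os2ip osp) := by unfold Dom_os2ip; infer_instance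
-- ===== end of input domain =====

-- B ORs each octet into the result back-to-front at its own bit position (seeding the sign mask
-- once up front), instead of A's left fold that shifts the accumulator and ORs each octet in.


-- ===== PORT A =====
-- osp[0] raises IndexError on []; Pre_os2ip excludes []; 'headD 0' is only for totality
def os2ip (osp : List Int) : Int :=
  let i0 : Int := if PySem.Int.band (osp.headD 0) 128 ≠ 0 then -1 else 0
  osp.foldl (fun i o => PySem.Int.bor (i <<< (8 : Nat)) o) i0

-- ===== PORT B =====
def os2ip_alt (osp : List Int) : Int :=
  let neg : Int := PySem.Int.band (osp.headD 0) 128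
  let seed : Int := if neg ≠ 0 then -((1 : Int) <<< (8 * osp.length)) else 0
  (osp.reverse.foldl (fun (p : Int × Nat) (o : Int) => (PySem.Int.bor p.1 (o <<< p.2), p.2 + 8)) (seed, 0)).1

-- ===== PRECONDITION & SPEC =====
-- Pre_ excludes only the empty list, on which A raises IndexError (osp[0]).
def Pre_os2ip (osp : List Int) : Prop := osp ≠ []
instance (osp : List Int) : Decidable (Pre_os2ip osp) := by unfold Pre_os2ip; infer_instance
def pvWitness_os2ip : List Int := [129, 7]

def Spec_os2ip (osp : List Int) (out : Int) : Prop := out = os2ip_alt osp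
instance (osp : List Int) (out : Int) : Decidable (Spec_os2ip osp out) := by unfold Spec_os2ip; infer_instance

-- ===== CLAIM (what is proved, stated in full; the proofs are below) =====
def Claim_equal_os2ip : Prop := ∀ (osp : List Int), Dom_os2ip osp → Pre_os2ip osp → Spec_os2ip osp (os2ip osp)

-- ===== LEMMAS AND PROOFS =====

-- Nat: disjoint bit patterns add like OR
theorem pv_disj_add (x : ℕ) : ∀ y : ℕ, x &&& y = 0 → x + y = x ||| y := by
  induction x using Nat.binaryRec with
  | zero => intro y _; simp
  | bit b m ih =>
    intro y h
    induction y using Nat.binaryRec with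
    | zero => simp
    | bit c n _ =>
      rw [Nat.land_bit, Nat.bit_eq_zero_iff] at h
      obtain ⟨hmn, hbc⟩ := h
      have hadd := ih n hmn
      rw [Nat.lor_bit]
      cases b <;> cases c <;>
        first
        | exact absurd hbc (by decide)
        | (simp only [Nat.bit, Bool.cond_false, Bool.cond_true, Bool.or_false, Bool.or_true]
           omega)

theorem pv_ldiff_sub (n m : ℕ) : n - (n &&& m) = Nat.ldiff n m := by
  have h1 : (n &&& m) &&& Nat.ldiff n m = 0 := by
    apply Nat.eq_of_testBit_eq; intro k
    rw [Nat.testBit_land, Nat.testBit_land, Nat.testBit_ldiff, Nat.zero_testBit]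
    cases n.testBit k <;> cases m.testBit k <;> rfl
  have h2 : (n &&& m) ||| Nat.ldiff n m = n := by
    apply Nat.eq_of_testBit_eq; intro k
    rw [Nat.testBit_lor, Nat.testBit_land, Nat.testBit_ldiff]
    cases n.testBit k <;> cases m.testBit k <;> rfl
  have h3 := pv_disj_add _ _ h1
  omega

-- PySem's Python-exact OR coincides with Mathlib's Int.lor
theorem pv_bor_eq_lor (x y : Int) : PySem.Int.bor x y = Int.lor x y := by
  unfold PySem.Int.bor
  rcases x with m | m <;> rcases y with n | n <;> try simp only [Int.ofNat_eq_natCast]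
  · rw [if_pos (Int.natCast_nonneg m), if_pos (Int.natCast_nonneg n)]
    rfl
  · rw [if_pos (Int.natCast_nonneg m), if_neg (not_le.mpr (Int.negSucc_lt_zero n))]
    have h1 : -(Int.negSucc n) - 1 = (n : ℤ) := by rw [Int.negSucc_eq]; ring
    have h2 : ((m : ℤ)).toNat = m := Int.toNat_natCast m
    rw [h1, h2, Int.toNat_natCast, pv_ldiff_sub]
    show -((Nat.ldiff n m : ℕ) : ℤ) - 1 = Int.negSucc (Nat.ldiff n m)
    rw [Int.negSucc_eq]; ring
  · rw [if_neg (not_le.mpr (Int.negSucc_lt_zero m)), if_pos (Int.natCast_nonneg n)]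
    have h1 : -(Int.negSucc m) - 1 = (m : ℤ) := by rw [Int.negSucc_eq]; ring
    have h2 : ((n : ℤ)).toNat = n := Int.toNat_natCast n
    rw [h1, h2, Int.toNat_natCast, pv_ldiff_sub]
    show -((Nat.ldiff m n : ℕ) : ℤ) - 1 = Int.negSucc (Nat.ldiff m n)
    rw [Int.negSucc_eq]; ring
  · rw [if_neg (not_le.mpr (Int.negSucc_lt_zero m)), if_neg (not_le.mpr (Int.negSucc_lt_zero n))]
    have h1 : -(Int.negSucc m) - 1 = (m : ℤ) := by rw [Int.negSucc_eq]; ring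
    have h2 : -(Int.negSucc n) - 1 = (n : ℤ) := by rw [Int.negSucc_eq]; ring
    rw [h1, h2, Int.toNat_natCast, Int.toNat_natCast]
    show -((m &&& n : ℕ) : ℤ) - 1 = Int.negSucc (m &&& n)
    rw [Int.negSucc_eq]; ring

theorem pv_tb_coe (a j : ℕ) : ((a : ℤ)).testBit j = a.testBit j := rfl

theorem pv_tb_negSucc (a j : ℕ) : (Int.negSucc a).testBit j = !(a.testBit j) := rfl

theorem pv_tb_zero (j : ℕ) : (0 : ℤ).testBit j = false := by
  rw [show (0 : ℤ) = ((0 : ℕ) : ℤ) from rfl, pv_tb_coe, Nat.zero_testBit]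

theorem pv_int_ext {x y : Int} (h : ∀ k, x.testBit k = y.testBit k) : x = y := by
  have big : ∀ a b : ℕ, a.testBit (a + b) = false := fun a b =>
    Nat.testBit_lt_two_pow (lt_of_lt_of_le Nat.lt_two_pow_self
      (Nat.pow_le_pow_right (by norm_num) (by omega)))
  rcases x with m | m <;> rcases y with n | n
  · have : m = n := Nat.eq_of_testBit_eq fun k => by
      have hk := h k; rwa [show Int.ofNat m = ((m : ℕ) : ℤ) from rfl,
        show Int.ofNat n = ((n : ℕ) : ℤ) from rfl, pv_tb_coe, pv_tb_coe] at hk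
    simp [this]
  · exfalso
    have hk := h (m + n)
    have e1 : m.testBit (m + n) = false := big m n
    have e2 : n.testBit (m + n) = false := by rw [Nat.add_comm]; exact big n m
    rw [show Int.ofNat m = ((m : ℕ) : ℤ) from rfl, pv_tb_coe, pv_tb_negSucc, e1, e2] at hk
    simp at hk
  · exfalso
    have hk := h (m + n)
    have e1 : m.testBit (m + n) = false := big m n
    have e2 : n.testBit (m + n) = false := by rw [Nat.add_comm]; exact big n m
    rw [show Int.ofNat n = ((n : ℕ) : ℤ) from rfl, pv_tb_coe, pv_tb_negSucc, e1, e2] at hk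
    simp at hk
  · have : m = n := Nat.eq_of_testBit_eq fun k => by
      have hk := h k; rw [pv_tb_negSucc, pv_tb_negSucc] at hk
      cases hm : m.testBit k <;> cases hn : n.testBit k <;> simp_all
    simp [this]

theorem pv_tb_shl (x : Int) (k j : Nat) :
    (x <<< k).testBit j = if j < k then false else x.testBit (j - k) := by
  rcases x with m | m
  · have hv : (Int.ofNat m) <<< k = ((2 ^ k * m : ℕ) : ℤ) := by
      rw [Int.shiftLeft_eq, show Int.ofNat m = ((m : ℕ) : ℤ) from rfl]
      push_cast; ring
    rw [hv, pv_tb_coe, show 2 ^ k * m = 2 ^ k * m + 0 from by omega,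
      Nat.testBit_two_pow_mul_add m (Nat.two_pow_pos k) j,
      show Int.ofNat m = ((m : ℕ) : ℤ) from rfl, pv_tb_coe]
    split_ifs with hj
    · exact Nat.zero_testBit j
    · rfl
  · have h1 : (1 : ℕ) ≤ 2 ^ k := Nat.one_le_two_pow
    have hv : (Int.negSucc m) <<< k = Int.negSucc (2 ^ k * m + (2 ^ k - 1)) := by
      rw [Int.shiftLeft_eq, Int.negSucc_eq, Int.negSucc_eq]
      push_cast [h1]
      ring
    rw [hv, pv_tb_negSucc,
      Nat.testBit_two_pow_mul_add m (by omega : 2 ^ k - 1 < 2 ^ k) j, pv_tb_negSucc]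
    split_ifs with hj
    · rw [Nat.testBit_two_pow_sub_one]; simp [hj]
    · rfl

theorem pv_lor_comm (a b : Int) : Int.lor a b = Int.lor b a :=
  pv_int_ext fun k => by rw [Int.testBit_lor, Int.testBit_lor, Bool.or_comm]

theorem pv_lor_assoc (a b c : Int) : Int.lor (Int.lor a b) c = Int.lor a (Int.lor b c) :=
  pv_int_ext fun k => by simp [Int.testBit_lor, Bool.or_assoc]

theorem pv_lor_zero (a : Int) : Int.lor a 0 = a :=
  pv_int_ext fun k => by simp [Int.testBit_lor, pv_tb_zero]

theorem pv_zero_lor (a : Int) : Int.lor 0 a = a := by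
  rw [pv_lor_comm, pv_lor_zero]

theorem pv_lor_rot (x y z : Int) :
    Int.lor (Int.lor x y) z = Int.lor (Int.lor z x) y :=
  pv_int_ext fun k => by
    rw [Int.testBit_lor, Int.testBit_lor, Int.testBit_lor, Int.testBit_lor]
    cases x.testBit k <;> cases y.testBit k <;> cases z.testBit k <;> rfl

theorem pv_shl_lor (a b : Int) (k : Nat) :
    (Int.lor a b) <<< k = Int.lor (a <<< k) (b <<< k) :=
  pv_int_ext fun j => by
    rw [pv_tb_shl, Int.testBit_lor, Int.testBit_lor, pv_tb_shl, pv_tb_shl]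
    split_ifs <;> simp

theorem pv_shl_shl (x : Int) (a b : Nat) : (x <<< a) <<< b = x <<< (a + b) := by
  rw [Int.shiftLeft_eq, Int.shiftLeft_eq, Int.shiftLeft_eq, pow_add]; ring

theorem pv_shl_zero (x : Int) : x <<< (0 : Nat) = x := by
  rw [Int.shiftLeft_eq]; simp

theorem pv_zero_shl (k : Nat) : (0 : Int) <<< k = 0 := by
  rw [Int.shiftLeft_eq]; ring

theorem pv_affine (l : List Int) : ∀ s : Int,
    l.foldl (fun i o => Int.lor (i <<< (8 : Nat)) o) s
      = Int.lor (s <<< (8 * l.length)) (l.foldl (fun i o => Int.lor (i <<< (8 : Nat)) o) 0) := by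
  induction l with
  | nil =>
    intro s
    simp only [List.foldl_nil, List.length_nil, Nat.mul_zero, pv_shl_zero, pv_lor_zero]
  | cons a t ih =>
    intro s
    simp only [List.foldl_cons, List.length_cons]
    rw [ih (Int.lor (s <<< (8 : Nat)) a), ih (Int.lor ((0 : Int) <<< (8 : Nat)) a)]
    simp only [pv_shl_lor, pv_shl_shl, pv_zero_shl, pv_zero_lor]
    rw [show (8 : Nat) + 8 * t.length = 8 * (t.length + 1) from by ring]
    rw [pv_lor_assoc]

theorem pv_revfold (l : List Int) : ∀ (j : Int) (s : Nat),
    l.reverse.foldl (fun (p : Int × Nat) (o : Int) => (Int.lor p.1 (o <<< p.2), p.2 + 8)) (j, s)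
      = (Int.lor ((l.foldl (fun i o => Int.lor (i <<< (8 : Nat)) o) 0) <<< s) j,
          s + 8 * l.length) := by
  induction l with
  | nil =>
    intro j s
    simp only [List.reverse_nil, List.foldl_nil, List.length_nil, Nat.mul_zero, Nat.add_zero,
      pv_zero_shl, pv_zero_lor]
  | cons a t ih =>
    intro j s
    rw [List.reverse_cons, List.foldl_append, ih j s]
    simp only [List.foldl_cons, List.foldl_nil, List.length_cons]
    rw [pv_affine t (Int.lor ((0 : Int) <<< (8 : Nat)) a)]
    simp only [pv_shl_lor, pv_shl_shl, pv_zero_shl, pv_zero_lor]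
    rw [Prod.mk.injEq]
    constructor
    · rw [show 8 * t.length + s = s + 8 * t.length from by omega]
      rw [pv_lor_rot]
    · omega

-- ===== VERDICT (by name: the statement is the Claim_ definition above) =====
theorem os2ip_spec : Claim_equal_os2ip := by
  intro osp _ _
  simp only [Spec_os2ip, os2ip, os2ip_alt, pv_bor_eq_lor]
  rw [pv_revfold osp _ 0, pv_shl_zero]
  by_cases hneg : PySem.Int.band (osp.headD 0) 128 ≠ 0
  · rw [if_pos hneg, if_pos hneg]
    rw [pv_affine osp (-1)]
    rw [show ((-1 : Int)) <<< (8 * osp.length) = -((1 : Int) <<< (8 * osp.length)) from by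
      rw [Int.shiftLeft_eq, Int.shiftLeft_eq]; ring]
    rw [pv_lor_comm]
  · rw [if_neg hneg, if_neg hneg, pv_lor_zero]
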